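-- pv_equiv track=rewrite | github.com/didogrigorov/EdabitExercisesPython | Imaginary Coding Interview.py | interview
-- ===== SOURCE A (Python) =====
-- def interview(lst, tot):
--     is_ok = False
--     all_true = []
--
--     if len(lst) != 8 or tot > 120:
--         return "disqualified"
--
--     #very easy
--     very_easy = lst[0:2]
--     very_easy_result = [True if x <= 5 else False for x in very_easy]
--
--     if all(very_easy_result):
--         is_ok = True
--         all_true.append(True)
--     else:
--         all_true.append(False)
--
--     #easy
--     easy = lst[2:4]
--     easy_result = [True if x <= 10 else False for x in easy]
--
--     if all(easy_result):
--         is_ok = True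
--         all_true.append(True)
--     else:
--         all_true.append(False)
--
--     #medium
--     medium = lst[4:6]
--     medium_result = [True if x <= 15 else False for x in medium]
--
--     if all(medium_result):
--         is_ok = True
--         all_true.append(True)
--     else:
--         all_true.append(False)
--
--     #hard
--     hard = lst[6:8]
--     hard_result = [True if x <= 20 else False for x in hard]
--
--     if all(hard_result):
--         is_ok = True
--         all_true.append(True)
--     else:
--         all_true.append(False)
--
--
--     return "qualified" if all(all_true) else "disqualified"
-- ===== SOURCE B (Python) =====
-- def interview(lst, tot):
--     if len(lst) != 8 or tot > 120:
--         return "disqualified"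
--     thresholds = [5, 5, 10, 10, 15, 15, 20, 20]
--     return "qualified" if all(x <= t for x, t in zip(lst, thresholds)) else "disqualified"
-- ===== Notes on version B (the rewrite author's own statement) =====
-- stated objective: simpler
-- what changed: Replaces the four slice-then-comprehension pair checks and the dead is_ok/all_true bookkeeping with one table of per-index thresholds checked in a single zip pass.
import Mathlib
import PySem

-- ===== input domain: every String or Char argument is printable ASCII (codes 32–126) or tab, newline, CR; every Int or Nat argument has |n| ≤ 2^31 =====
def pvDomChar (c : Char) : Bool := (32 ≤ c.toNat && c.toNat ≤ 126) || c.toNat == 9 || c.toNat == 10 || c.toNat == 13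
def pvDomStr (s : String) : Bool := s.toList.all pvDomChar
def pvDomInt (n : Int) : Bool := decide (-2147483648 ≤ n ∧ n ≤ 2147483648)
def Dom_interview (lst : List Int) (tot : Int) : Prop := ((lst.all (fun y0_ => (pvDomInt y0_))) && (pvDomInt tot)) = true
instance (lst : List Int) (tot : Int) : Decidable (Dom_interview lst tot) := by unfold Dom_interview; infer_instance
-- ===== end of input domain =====

-- B replaces A's four slice-based pair checks and dead is_ok/all_true bookkeeping with one
-- table-driven zip pass over per-index thresholds (objective: simpler).


-- ===== PORT A =====
def interview (lst : List Int) (tot : Int) : String :=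
  if lst.length ≠ 8 ∨ tot > 120 then "disqualified"
  else
    let very_easy := PySem.List.slice lst (some 0) (some 2)
    let very_easy_result := very_easy.map (fun x => if x ≤ 5 then true else false)
    let all_true1 : List Bool := if very_easy_result.all id then [true] else [false]
    let easy := PySem.List.slice lst (some 2) (some 4)
    let easy_result := easy.map (fun x => if x ≤ 10 then true else false)
    let all_true2 : List Bool := if easy_result.all id then all_true1 ++ [true] else all_true1 ++ [false]
    let medium := PySem.List.slice lst (some 4) (some 6)
    let medium_result := medium.map (fun x => if x ≤ 15 then true else false)
    let all_true3 : List Bool := if medium_result.all id then all_true2 ++ [true] else all_true2 ++ [false]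
    let hard := PySem.List.slice lst (some 6) (some 8)
    let hard_result := hard.map (fun x => if x ≤ 20 then true else false)
    let all_true4 : List Bool := if hard_result.all id then all_true3 ++ [true] else all_true3 ++ [false]
    if all_true4.all id then "qualified" else "disqualified"

-- ===== PORT B =====
def interview_alt (lst : List Int) (tot : Int) : String :=
  if lst.length ≠ 8 ∨ tot > 120 then "disqualified"
  else
    let thresholds : List Int := [5, 5, 10, 10, 15, 15, 20, 20]
    if (lst.zip thresholds).all (fun p => p.1 ≤ p.2) then "qualified" else "disqualified"

-- ===== PRECONDITION & SPEC =====
def Spec_interview (lst : List Int) (tot : Int) (out : String) : Prop := out = interview_alt lst tot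
instance (lst : List Int) (tot : Int) (out : String) : Decidable (Spec_interview lst tot out) := by unfold Spec_interview; infer_instance

-- ===== CLAIM (what is proved, stated in full; the proofs are below) =====
def Claim_equal_interview : Prop := ∀ (lst : List Int) (tot : Int), Dom_interview lst tot → Spec_interview lst tot (interview lst tot)

-- ===== LEMMAS AND PROOFS =====
theorem interview_eq_alt (lst : List Int) (tot : Int) :
    interview lst tot = interview_alt lst tot := by
  by_cases hlen : lst.length = 8
  · match lst, hlen with
    | [a, b, c, d, e, f, g, h], _ =>
      simp only [interview, interview_alt, PySem.List.slice]
      by_cases ht : tot > 120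
      · simp [ht]
      · simp only [ht]
        norm_num [List.zip, List.zipWith]
        split_ifs <;> simp_all <;> omega
  · simp [interview, interview_alt, hlen]

-- ===== VERDICT (by name: the statement is the Claim_ definition above) =====
theorem interview_spec : Claim_equal_interview := by
  intro lst tot _
  unfold Spec_interview
  exact interview_eq_alt lst tot
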